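-- pv_equiv track=rewrite | github.com/wookie184/mscroggs-advent-2022 | main.py | positions_each_day
-- ===== SOURCE A (Python) =====
-- from typing import Generator
--
-- def positions_each_day(
--     x0: int, y0: int, dx: int, dy: int
-- ) -> Generator[tuple[int, int, int], None, None]:
--     assert 1 <= x0 <= 20 and 1 <= y0 <= 20 and 1 <= dx <= 20 and 1 <= dy <= 20
--     x, y = x0, y0
--     for day in range(1, 26):
--         yield day, x, y
--
--         x += dx
--         y += dy
--
--         if x > 20:
--             x -= 20
--         if y > 20:
--             y -= 20
-- ===== SOURCE B (Python) =====
-- def positions_each_day(x0, y0, dx, dy):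
--     assert 1 <= x0 <= 20 and 1 <= y0 <= 20 and 1 <= dx <= 20 and 1 <= dy <= 20
--     for day in range(1, 26):
--         yield day, (x0 - 1 + (day - 1) * dx) % 20 + 1, (y0 - 1 + (day - 1) * dy) % 20 + 1
-- ===== Notes on version B (the rewrite author's own statement) =====
-- stated objective: simpler
-- what changed: Replaced the running (x, y) accumulator with a stateless closed-form modular computation of each day's position directly from the day number.
import Mathlib
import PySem

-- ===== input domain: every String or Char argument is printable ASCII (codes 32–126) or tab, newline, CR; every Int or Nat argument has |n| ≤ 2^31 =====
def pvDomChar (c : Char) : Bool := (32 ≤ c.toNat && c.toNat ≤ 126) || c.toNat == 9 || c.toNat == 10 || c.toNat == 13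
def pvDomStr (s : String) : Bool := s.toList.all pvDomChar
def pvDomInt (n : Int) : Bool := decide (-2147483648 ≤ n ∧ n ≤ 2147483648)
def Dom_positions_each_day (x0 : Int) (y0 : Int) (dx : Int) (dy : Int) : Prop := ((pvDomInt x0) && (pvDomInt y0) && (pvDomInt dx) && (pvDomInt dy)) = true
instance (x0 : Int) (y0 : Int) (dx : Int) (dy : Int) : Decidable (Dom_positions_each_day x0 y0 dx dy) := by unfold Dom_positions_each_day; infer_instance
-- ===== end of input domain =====

-- B replaces the running (x, y) state with a stateless closed-form modular position per day (objective: simpler).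


-- ===== PORT A =====
-- A's loop body: yield (day, x, y), then step x and y with a single-subtraction wraparound.
def pvWrapA (v : Int) : Int := if v > 20 then v - 20 else v

def pvLoopA (dx : Int) (dy : Int) : List Int → Int → Int → List (Int × Int × Int)
  | [], _, _ => []
  | d :: ds, x, y => (d, x, y) :: pvLoopA dx dy ds (pvWrapA (x + dx)) (pvWrapA (y + dy))

def positions_each_day (x0 : Int) (y0 : Int) (dx : Int) (dy : Int) : List (Int × Int × Int) :=
  pvLoopA dx dy (PySem.List.pyRange 1 26 1) x0 y0

-- ===== PORT B =====
def positions_each_day_alt (x0 : Int) (y0 : Int) (dx : Int) (dy : Int) : List (Int × Int × Int) :=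
  (PySem.List.pyRange 1 26 1).map (fun day =>
    (day, PySem.Int.mod (x0 - 1 + (day - 1) * dx) 20 + 1,
          PySem.Int.mod (y0 - 1 + (day - 1) * dy) 20 + 1))

-- ===== PRECONDITION & SPEC =====
-- Pre_: exactly the assert in both Pythons; outside it both raise AssertionError.
def Pre_positions_each_day (x0 : Int) (y0 : Int) (dx : Int) (dy : Int) : Prop :=
  1 ≤ x0 ∧ x0 ≤ 20 ∧ 1 ≤ y0 ∧ y0 ≤ 20 ∧ 1 ≤ dx ∧ dx ≤ 20 ∧ 1 ≤ dy ∧ dy ≤ 20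
instance (x0 : Int) (y0 : Int) (dx : Int) (dy : Int) : Decidable (Pre_positions_each_day x0 y0 dx dy) := by unfold Pre_positions_each_day; infer_instance

def pvWitness_positions_each_day : Int × Int × Int × Int := (3, 17, 5, 20)

def Spec_positions_each_day (x0 : Int) (y0 : Int) (dx : Int) (dy : Int) (out : List (Int × Int × Int)) : Prop := out = positions_each_day_alt x0 y0 dx dy
instance (x0 : Int) (y0 : Int) (dx : Int) (dy : Int) (out : List (Int × Int × Int)) : Decidable (Spec_positions_each_day x0 y0 dx dy out) := by unfold Spec_positions_each_day; infer_instance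

-- ===== CLAIM (what is proved, stated in full; the proofs are below) =====
def Claim_equal_positions_each_day : Prop := ∀ (x0 : Int) (y0 : Int) (dx : Int) (dy : Int), Dom_positions_each_day x0 y0 dx dy → Pre_positions_each_day x0 y0 dx dy → Spec_positions_each_day x0 y0 dx dy (positions_each_day x0 y0 dx dy)

-- ===== LEMMAS AND PROOFS =====

-- One step of A's wraparound equals one more modular step of B's closed form.
lemma pvWrap_step (m d : Int) (hd1 : 1 ≤ d) (hd2 : d ≤ 20) :
    pvWrapA (PySem.Int.mod m 20 + 1 + d) = PySem.Int.mod (m + d) 20 + 1 := by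
  have h1 : PySem.Int.mod m 20 = m % 20 := PySem.Int.mod_eq_emod_of_pos (by norm_num)
  have h2 : PySem.Int.mod (m + d) 20 = (m + d) % 20 := PySem.Int.mod_eq_emod_of_pos (by norm_num)
  unfold pvWrapA
  rw [h1, h2]
  omega

-- Loop invariant: starting at day k with the closed-form position, A's loop produces B's map.
lemma pvLoop_eq (x0 y0 dx dy : Int) (hdx1 : 1 ≤ dx) (hdx2 : dx ≤ 20)
    (hdy1 : 1 ≤ dy) (hdy2 : dy ≤ 20) :
    ∀ (n : Nat) (k : Int), k + n = 26 →
    pvLoopA dx dy (PySem.List.pyRange k 26 1)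
      (PySem.Int.mod (x0 - 1 + (k - 1) * dx) 20 + 1)
      (PySem.Int.mod (y0 - 1 + (k - 1) * dy) 20 + 1)
    = (PySem.List.pyRange k 26 1).map (fun day =>
        (day, PySem.Int.mod (x0 - 1 + (day - 1) * dx) 20 + 1,
              PySem.Int.mod (y0 - 1 + (day - 1) * dy) 20 + 1)) := by
  intro n
  induction n with
  | zero =>
      intro k hk
      rw [PySem.List.pyRange_one_eq_nil (by omega)]
      rfl
  | succ m ih =>
      intro k hk
      rw [PySem.List.pyRange_one_cons (by omega)]
      simp only [pvLoopA, List.map]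
      congr 1
      have hx : pvWrapA (PySem.Int.mod (x0 - 1 + (k - 1) * dx) 20 + 1 + dx)
            = PySem.Int.mod (x0 - 1 + (k + 1 - 1) * dx) 20 + 1 := by
        rw [pvWrap_step _ _ hdx1 hdx2]; ring_nf
      have hy : pvWrapA (PySem.Int.mod (y0 - 1 + (k - 1) * dy) 20 + 1 + dy)
            = PySem.Int.mod (y0 - 1 + (k + 1 - 1) * dy) 20 + 1 := by
        rw [pvWrap_step _ _ hdy1 hdy2]; ring_nf
      rw [hx, hy, ih (k + 1) (by omega)]

-- ===== VERDICT (by name: the statement is the Claim_ definition above) =====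
theorem positions_each_day_spec : Claim_equal_positions_each_day := by
  intro x0 y0 dx dy _ hpre
  obtain ⟨hx1, hx2, hy1, hy2, hdx1, hdx2, hdy1, hdy2⟩ := hpre
  unfold Spec_positions_each_day positions_each_day positions_each_day_alt
  have hx0 : PySem.Int.mod (x0 - 1 + (1 - 1) * dx) 20 + 1 = x0 := by
    rw [PySem.Int.mod_eq_emod_of_pos (by norm_num : (0:Int) < 20)]; omega
  have hy0 : PySem.Int.mod (y0 - 1 + (1 - 1) * dy) 20 + 1 = y0 := by
    rw [PySem.Int.mod_eq_emod_of_pos (by norm_num : (0:Int) < 20)]; omega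
  have h := pvLoop_eq x0 y0 dx dy hdx1 hdx2 hdy1 hdy2 25 1 (by omega)
  rw [hx0, hy0] at h
  exact h
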